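-- pv_equiv track=rewrite | github.com/Kasiet2001/leetcode | longer_contiguous_segments_of_ones_than_zeros.py | checkZeroOnes
-- ===== SOURCE A (Python) =====
-- def checkZeroOnes(s):
--     ones = zeros = 0
--     curr_ones = curr_zeros = 0
--     for i in s:
--         if i == 1:
--             curr_ones += 1
--             curr_zeros = 0
--         else:
--             curr_ones = 0
--             curr_zeros += 1
--         ones = max(curr_ones, ones)
--         zeros = max(curr_zeros, zeros)
--     return ones > zeros
-- ===== SOURCE B (Python) =====
-- from itertools import groupby
--
--
-- def checkZeroOnes(s):
--     runs = [(k, sum(1 for _ in g)) for k, g in groupby(s, key=lambda x: x == 1)]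
--     ones = max((n for k, n in runs if k), default=0)
--     zeros = max((n for k, n in runs if not k), default=0)
--     return ones > zeros
-- ===== Notes on version B (the rewrite author's own statement) =====
-- stated objective: idiomatic
-- what changed: Replaces the four running counters with per-step max updates by an itertools.groupby pass that materialises the maximal runs keyed on (x == 1) and then takes max(..., default=0) over each key class.
import Mathlib
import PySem

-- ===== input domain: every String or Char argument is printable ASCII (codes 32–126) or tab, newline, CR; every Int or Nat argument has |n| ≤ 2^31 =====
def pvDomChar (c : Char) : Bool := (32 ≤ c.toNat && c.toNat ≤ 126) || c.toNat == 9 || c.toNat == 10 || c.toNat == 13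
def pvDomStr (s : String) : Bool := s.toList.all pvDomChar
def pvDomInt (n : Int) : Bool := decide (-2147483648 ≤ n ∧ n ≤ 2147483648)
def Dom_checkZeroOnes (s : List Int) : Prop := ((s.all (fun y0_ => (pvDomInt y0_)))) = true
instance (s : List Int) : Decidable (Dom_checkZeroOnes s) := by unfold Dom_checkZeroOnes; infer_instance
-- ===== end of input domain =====

-- B replaces A's four running counters with a groupby-style run decomposition plus max-with-default aggregation (idiomatic, same O(n) cost).


-- ===== PORT A =====
-- A's loop: state (ones, zeros, curr_ones, curr_zeros), one step per element.
def stepA (st : Int × Int × Int × Int) (i : Int) : Int × Int × Int × Int :=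
  let (ones, zeros, co, cz) := st
  let (co, cz) := if i == 1 then (co + 1, (0 : Int)) else ((0 : Int), cz + 1)
  (max co ones, max cz zeros, co, cz)

def checkZeroOnes (s : List Int) : Bool :=
  let st := s.foldl stepA (0, 0, 0, 0)
  decide (st.1 > st.2.1)

-- ===== PORT B =====
-- itertools.groupby(s, key=lambda x: x == 1) as (key, run length) pairs.
def groupRuns : List Int → List (Bool × Nat)
  | [] => []
  | x :: xs =>
    let k := x == 1
    (k, (xs.takeWhile (fun y => (y == 1) == k)).length + 1) ::
      groupRuns (xs.dropWhile (fun y => (y == 1) == k))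
termination_by s => s.length
decreasing_by
  simpa using Nat.lt_succ_of_le (List.length_dropWhile_le _ _)

-- max(gen, default=0) over the lengths of runs with the given key
def maxLen (gs : List (Bool × Nat)) (k : Bool) : Nat :=
  ((gs.filter (fun p => p.1 == k)).map Prod.snd).foldl max 0

def checkZeroOnes_alt (s : List Int) : Bool :=
  let runs := groupRuns s
  decide (maxLen runs true > maxLen runs false)

-- ===== PRECONDITION & SPEC =====
def Spec_checkZeroOnes (s : List Int) (out : Bool) : Prop := out = checkZeroOnes_alt s
instance (s : List Int) (out : Bool) : Decidable (Spec_checkZeroOnes s out) := by unfold Spec_checkZeroOnes; infer_instance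

-- ===== CLAIM (what is proved, stated in full; the proofs are below) =====
def Claim_equal_checkZeroOnes : Prop := ∀ (s : List Int), Dom_checkZeroOnes s → Spec_checkZeroOnes s (checkZeroOnes s)

-- ===== LEMMAS AND PROOFS =====

theorem foldl_max_out (l : List Nat) (a : Nat) :
    l.foldl max a = max a (l.foldl max 0) := by
  induction l generalizing a with
  | nil => simp
  | cons x l ih =>
    simp only [List.foldl_cons]
    rw [ih (max a x), ih (max 0 x)]
    simp [Nat.max_assoc]

theorem maxLen_cons (k : Bool) (n : Nat) (gs : List (Bool × Nat)) :
    maxLen ((k, n) :: gs) k = max n (maxLen gs k) := by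
  simp only [maxLen, List.filter_cons, beq_self_eq_true, if_pos, List.map_cons,
    List.foldl_cons, Nat.zero_max]
  exact foldl_max_out _ n

theorem maxLen_cons_ne (k k' : Bool) (n : Nat) (gs : List (Bool × Nat)) (h : k ≠ k') :
    maxLen ((k, n) :: gs) k' = maxLen gs k' := by
  simp [maxLen, h]

-- A nonempty run of ones: curr_ones keeps growing, ones tracks it, zeros untouched.
theorem run_true (y : Int) (r : List Int) (h : ∀ e ∈ y :: r, e == 1) (o z co cz : Int)
    (hco : co ≤ o) (hz : 0 ≤ z) :
    (y :: r).foldl stepA (o, z, co, cz) =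
      (max o (co + (r.length + 1)), z, co + (r.length + 1), 0) := by
  induction r generalizing y o co cz with
  | nil =>
    have hy : (y == 1) = true := h y (by simp)
    simp [stepA, hy]
    omega
  | cons y' r ih =>
    have hy : (y == 1) = true := h y (by simp)
    rw [List.foldl_cons,
      show stepA (o, z, co, cz) y = (max (co + 1) o, z, co + 1, 0) from by
        simp [stepA, hy]; omega,
      ih y' (fun e he => h e (by simp at he ⊢; tauto)) _ _ _ (le_max_left _ _)]
    simp only [List.length_cons, Prod.mk.injEq]
    refine ⟨by push_cast; omega, trivial, by push_cast; omega, trivial⟩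

-- A nonempty run of non-ones: symmetric.
theorem run_false (y : Int) (r : List Int) (h : ∀ e ∈ y :: r, (e == 1) = false)
    (o z co cz : Int) (hcz : cz ≤ z) (ho : 0 ≤ o) :
    (y :: r).foldl stepA (o, z, co, cz) =
      (o, max z (cz + (r.length + 1)), 0, cz + (r.length + 1)) := by
  induction r generalizing y z co cz with
  | nil =>
    have hy : (y == 1) = false := h y (by simp)
    simp [stepA, hy]
    omega
  | cons y' r ih =>
    have hy : (y == 1) = false := h y (by simp)
    rw [List.foldl_cons,
      show stepA (o, z, co, cz) y = (o, max (cz + 1) z, 0, cz + 1) from by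
        simp [stepA, hy]; omega,
      ih y' (fun e he => h e (by simp at he ⊢; tauto)) _ _ _ (le_max_left _ _)]
    simp only [List.length_cons, Prod.mk.injEq]
    refine ⟨trivial, by push_cast; omega, trivial, by push_cast; omega⟩

-- Main invariant: folding A's step from a compatible state computes the run maxima.
theorem main_inv (s : List Int) (o z co cz : Int)
    (ho : 0 ≤ o) (hz : 0 ≤ z) (hco : co ≤ o) (hcz : cz ≤ z)
    (hcomp : s = [] ∨ (if (s.head! == 1) then co = 0 else cz = 0)) :
    (s.foldl stepA (o, z, co, cz)).1 = max o (maxLen (groupRuns s) true) ∧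
    (s.foldl stepA (o, z, co, cz)).2.1 = max z (maxLen (groupRuns s) false) := by
  induction hn : s.length using Nat.strong_induction_on generalizing s o z co cz with
  | _ n ih =>
    match s, hn with
    | [], _ => simp [groupRuns, maxLen]; omega
    | x :: xs, hn =>
      rcases hcomp with h | hcomp
      · exact absurd h (by simp)
      by_cases hk : (x == 1) = true
      · -- head run is a run of ones
        simp only [List.head!_cons, hk, if_pos] at hcomp
        subst hcomp
        have hsplit : x :: xs =
            (x :: xs.takeWhile (fun y => (y == 1) == true)) ++
              xs.dropWhile (fun y => (y == 1) == true) := by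
          simp [List.takeWhile_append_dropWhile]
        set run := xs.takeWhile (fun y => (y == 1) == true) with hrun
        set rest := xs.dropWhile (fun y => (y == 1) == true) with hrest
        set m : Int := (run.length : Int) + 1 with hm
        have hall : ∀ e ∈ x :: run, e == 1 := by
          intro e he
          rcases List.mem_cons.mp he with rfl | he
          · exact hk
          · simpa using List.mem_takeWhile_imp he
        have hF : List.foldl stepA (o, z, 0, cz) (x :: xs) =
            List.foldl stepA (max o m, z, m, 0) rest := by
          conv_lhs => rw [hsplit]
          rw [List.foldl_append, run_true x run hall o z 0 cz ho hz,
            show (0 : Int) + ((run.length : Int) + 1) = m from by omega]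
        have hm0 : 0 ≤ m := by positivity
        have hrc : rest = [] ∨ (if (rest.head! == 1) then m = 0 else (0:Int) = 0) := by
          rcases hre : rest with _ | ⟨y, t⟩
          · exact Or.inl rfl
          · right
            have : ¬ ((y == 1) == true) = true := by
              have := List.head?_dropWhile_not (fun y => (y == 1) == true) xs
              rw [← hrest, hre] at this
              simpa using this
            have hyf : (y == 1) = false := by simpa using this
            simp [hyf]
        have hlen : rest.length < n := by
          rw [← hn, hrest]
          simpa using Nat.lt_succ_of_le (List.length_dropWhile_le _ _)
        obtain ⟨h1, h2⟩ := ih rest.length hlen rest (max o m) z m 0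
          (le_trans ho (le_max_left _ _)) hz (le_max_right _ _) hz hrc rfl
        have hg : groupRuns (x :: xs) = (true, run.length + 1) :: groupRuns rest := by
          rw [groupRuns]; simp only [hk]; rw [← hrun, ← hrest]
        rw [hF, h1, h2, hg, maxLen_cons, maxLen_cons_ne true false _ _ (by simp)]
        refine ⟨by push_cast [hm]; omega, rfl⟩
      · -- head run is a run of non-ones
        have hkf : (x == 1) = false := by simpa using hk
        simp only [List.head!_cons, hkf, Bool.false_eq_true, if_neg, not_false_iff] at hcomp
        subst hcomp
        have hsplit : x :: xs =
            (x :: xs.takeWhile (fun y => (y == 1) == false)) ++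
              xs.dropWhile (fun y => (y == 1) == false) := by
          simp [List.takeWhile_append_dropWhile]
        set run := xs.takeWhile (fun y => (y == 1) == false) with hrun
        set rest := xs.dropWhile (fun y => (y == 1) == false) with hrest
        set m : Int := (run.length : Int) + 1 with hm
        have hall : ∀ e ∈ x :: run, (e == 1) = false := by
          intro e he
          rcases List.mem_cons.mp he with rfl | he
          · exact hkf
          · simpa using List.mem_takeWhile_imp he
        have hF : List.foldl stepA (o, z, co, 0) (x :: xs) =
            List.foldl stepA (o, max z m, 0, m) rest := by
          conv_lhs => rw [hsplit]
          rw [List.foldl_append, run_false x run hall o z co 0 hz ho,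
            show (0 : Int) + ((run.length : Int) + 1) = m from by omega]
        have hm0 : 0 ≤ m := by positivity
        have hrc : rest = [] ∨ (if (rest.head! == 1) then (0:Int) = 0 else m = 0) := by
          rcases hre : rest with _ | ⟨y, t⟩
          · exact Or.inl rfl
          · right
            have : ¬ ((y == 1) == false) = true := by
              have := List.head?_dropWhile_not (fun y => (y == 1) == false) xs
              rw [← hrest, hre] at this
              simpa using this
            have hyt : (y == 1) = true := by simpa using this
            simp [hyt]
        have hlen : rest.length < n := by
          rw [← hn, hrest]
          simpa using Nat.lt_succ_of_le (List.length_dropWhile_le _ _)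
        obtain ⟨h1, h2⟩ := ih rest.length hlen rest o (max z m) 0 m
          ho (le_trans hz (le_max_left _ _)) ho (le_max_right _ _) hrc rfl
        have hg : groupRuns (x :: xs) = (false, run.length + 1) :: groupRuns rest := by
          rw [groupRuns]; simp only [hkf]; rw [← hrun, ← hrest]
        rw [hF, h1, h2, hg, maxLen_cons, maxLen_cons_ne false true _ _ (by simp)]
        refine ⟨rfl, by push_cast [hm]; omega⟩

-- ===== VERDICT (by name: the statement is the Claim_ definition above) =====
theorem checkZeroOnes_spec : Claim_equal_checkZeroOnes := by
  intro s _
  unfold Spec_checkZeroOnes checkZeroOnes checkZeroOnes_alt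
  have hcomp : s = [] ∨ (if (s.head! == 1) then (0:Int) = 0 else (0:Int) = 0) := by
    rcases s with _ | ⟨x, xs⟩
    · exact Or.inl rfl
    · right; split <;> rfl
  obtain ⟨h1, h2⟩ := main_inv s 0 0 0 0 le_rfl le_rfl le_rfl le_rfl hcomp
  simp only [h1, h2, max_eq_right (Int.natCast_nonneg _)]
  simp
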